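-- pv_equiv track=rewrite | github.com/dongYoun2/dual-encoding-system | utils/utils_.py | word_frequency
-- ===== SOURCE A (Python) =====
-- from typing import Tuple, List, Iterable
-- from collections import Counter
--
-- def word_frequency(words: List[str], threshold=0, max_len=-1) -> Tuple[List[int], List[int]]:
--     counter = Counter(words)
--     valid_words = [w for w, freq in counter.items() if freq >= threshold]
--     valid_words = sorted(valid_words, key=lambda w: counter[w], reverse=True)
--
--     if max_len > -1:
--         valid_words = valid_words[:max_len]
--
--     counts = [counter[w] for w in valid_words]
--
--     assert len(valid_words) == len(counts)
--
--     return valid_words, counts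
-- ===== SOURCE B (Python) =====
-- def word_frequency(words, threshold=0, max_len=-1):
--     counts = {}
--     order = []
--     for w in words:
--         if w in counts:
--             counts[w] += 1
--         else:
--             counts[w] = 1
--             order.append(w)
--     maxf = 0
--     for f in counts.values():
--         if f > maxf:
--             maxf = f
--     lo = threshold if threshold > 1 else 1
--     selected = []
--     for f in range(maxf, lo - 1, -1):
--         for w in order:
--             if counts[w] == f:
--                 selected.append(w)
--     if max_len > -1:
--         selected = selected[:max_len]
--     return selected, [counts[w] for w in selected]
-- ===== Notes on version B (the rewrite author's own statement) =====
-- stated objective: alternative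
-- what changed: Replaces Counter plus a stable reverse sort by key with a hand-built count dict in first-appearance order and a sort-free descending frequency sweep (for each frequency from the maximum down to the threshold, emit the words with that count in first-appearance order), which reproduces the stable descending tie order without sorting.
import Mathlib
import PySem

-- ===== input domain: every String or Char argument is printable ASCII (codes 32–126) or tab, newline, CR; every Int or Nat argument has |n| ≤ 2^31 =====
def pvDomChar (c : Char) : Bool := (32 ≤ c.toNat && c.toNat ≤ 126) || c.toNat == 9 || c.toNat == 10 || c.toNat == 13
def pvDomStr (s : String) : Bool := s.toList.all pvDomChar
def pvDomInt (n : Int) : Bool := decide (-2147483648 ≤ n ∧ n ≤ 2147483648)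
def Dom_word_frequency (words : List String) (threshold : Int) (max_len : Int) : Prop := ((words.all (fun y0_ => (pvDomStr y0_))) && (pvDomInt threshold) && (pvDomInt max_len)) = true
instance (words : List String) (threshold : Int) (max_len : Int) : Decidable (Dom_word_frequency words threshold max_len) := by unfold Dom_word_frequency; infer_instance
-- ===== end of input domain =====

-- B replaces Counter + stable reverse sort with a first-appearance-order count dict and a
-- sort-free descending frequency sweep (alternative algorithm, same exact output).

-- ===== PORT A =====
def word_frequency (words : List String) (threshold : Int) (max_len : Int) : List String × List Int :=
  let counter := PySem.Dict.counter words
  let valid0 := (counter.items.filter (fun p => threshold ≤ p.2)).map (fun p => p.1)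
  let valid1 := PySem.List.sorted valid0 (fun w => counter.getD w 0) true
  let valid2 := if max_len > -1 then PySem.List.slice valid1 none (some max_len) else valid1
  let counts := valid2.map (fun w => counter.getD w 0)
  (valid2, counts)

-- ===== PORT B =====
def word_frequency_alt (words : List String) (threshold : Int) (max_len : Int) : List String × List Int :=
  let st := words.foldl (fun (st : PySem.Dict String Int × List String) w =>
      if st.1.contains w then (st.1.modify w 0 (· + 1), st.2)
      else (st.1.insert w 1, st.2 ++ [w])) (PySem.Dict.empty, [])
  let counts := st.1
  let order := st.2
  let maxf := counts.values.foldl (fun m f => if f > m then f else m) 0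
  let lo := if threshold > 1 then threshold else 1
  let selected := (PySem.List.pyRange maxf (lo - 1) (-1)).foldl (fun acc f =>
      order.foldl (fun acc w => if counts.getD w 0 == f then acc ++ [w] else acc) acc) []
  let selected2 := if max_len > -1 then PySem.List.slice selected none (some max_len) else selected
  (selected2, selected2.map (fun w => counts.getD w 0))

-- ===== PRECONDITION & SPEC =====
def Spec_word_frequency (words : List String) (threshold : Int) (max_len : Int) (out : List String × List Int) : Prop := out = word_frequency_alt words threshold max_len
instance (words : List String) (threshold : Int) (max_len : Int) (out : List String × List Int) : Decidable (Spec_word_frequency words threshold max_len out) := by unfold Spec_word_frequency; infer_instance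

-- ===== CLAIM (what is proved, stated in full; the proofs are below) =====
def Claim_equal_word_frequency : Prop := ∀ (words : List String) (threshold : Int) (max_len : Int), Dom_word_frequency words threshold max_len → Spec_word_frequency words threshold max_len (word_frequency words threshold max_len)

-- ===== LEMMAS AND PROOFS =====

-- the build loop of B computes Counter(words) and the first-appearance order list
theorem pv_build (ws : List String) : ∀ (p : List String),
    ws.foldl (fun (st : PySem.Dict String Int × List String) w =>
      if st.1.contains w then (st.1.modify w 0 (· + 1), st.2)
      else (st.1.insert w 1, st.2 ++ [w])) (PySem.Dict.counter p, PySem.Set.ofList p)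
    = (PySem.Dict.counter (p ++ ws), PySem.Set.ofList (p ++ ws)) := by
  induction ws with
  | nil => intro p; simp
  | cons w t ih =>
    intro p
    rw [List.foldl_cons]
    by_cases hw : w ∈ p
    · have hc : (PySem.Dict.counter p).contains w = true := by
        rw [PySem.Dict.contains_counter]; simpa using hw
      rw [if_pos hc, ← PySem.Dict.counter_append_singleton]
      have h2 : PySem.Set.ofList (p ++ [w]) = PySem.Set.ofList p := by
        rw [PySem.Set.ofList_append_singleton,
          PySem.Set.add_of_mem ((PySem.Set.mem_ofList p w).mpr hw)]
      have h3 := ih (p ++ [w])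
      rw [h2] at h3
      rw [List.append_assoc, List.singleton_append] at h3
      exact h3
    · have hc : (PySem.Dict.counter p).contains w = false := by
        rw [PySem.Dict.contains_counter]; simpa using hw
      rw [if_neg (by simp [hc])]
      have hins : (PySem.Dict.counter p).insert w 1 = PySem.Dict.counter (p ++ [w]) := by
        rw [PySem.Dict.counter_append_singleton]
        simp only [PySem.Dict.modify, PySem.Dict.getD_counter]
        have h0 : List.count w p = 0 := List.count_eq_zero.mpr hw
        rw [h0]; norm_num
      have h2 : PySem.Set.ofList p ++ [w] = PySem.Set.ofList (p ++ [w]) := by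
        rw [PySem.Set.ofList_append_singleton,
          PySem.Set.add_of_not_mem (fun hm => hw ((PySem.Set.mem_ofList p w).mp hm))]
      rw [hins, h2]
      have h3 := ih (p ++ [w])
      rw [List.append_assoc, List.singleton_append] at h3
      exact h3

theorem pv_insertBy_skip {α : Type} (bef : α → α → Bool) (x : α) (l r : List α)
    (h : ∀ y ∈ l, bef x y = false) :
    PySem.List.insertBy bef x (l ++ r) = l ++ PySem.List.insertBy bef x r := by
  induction l with
  | nil => simp
  | cons y t ih =>
    have hy : bef x y = false := h y (by simp)
    rw [List.cons_append,
      show PySem.List.insertBy bef x (y :: (t ++ r)) =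
        if bef x y then x :: y :: (t ++ r) else y :: PySem.List.insertBy bef x (t ++ r) from by
          simp [PySem.List.insertBy],
      if_neg (by simp [hy]), ih (fun z hz => h z (by simp [hz])), List.cons_append]

-- inserting x into the bucket-concatenation form lands at the end of its own bucket
theorem pv_insert_bucket {α : Type} (key : α → Int) (fs : List Int)
    (hfs : fs.Pairwise (· > ·)) (p : List α) (x : α) (hx : key x ∈ fs) :
    PySem.List.insertBy (fun a b => decide (key b < key a)) x
      (fs.flatMap (fun f => p.filter (fun y => key y == f)))
    = fs.flatMap (fun f => (p ++ [x]).filter (fun y => key y == f)) := by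
  induction fs generalizing p with
  | nil => simp at hx
  | cons f fs' ih =>
    have hhead : ∀ g ∈ fs', f > g := (List.pairwise_cons.mp hfs).1
    have htail := (List.pairwise_cons.mp hfs).2
    simp only [List.flatMap_cons]
    by_cases hxf : key x = f
    · have hskip : ∀ y ∈ p.filter (fun y => key y == f),
          (fun a b => decide (key b < key a)) x y = false := by
        intro y hy
        have hk : key y = f := by simpa using (List.mem_filter.mp hy).2
        simp [hk, hxf]
      rw [pv_insertBy_skip _ _ _ _ hskip]
      have hR : PySem.List.insertBy (fun a b => decide (key b < key a)) x
          (fs'.flatMap (fun g => p.filter (fun y => key y == g)))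
          = x :: fs'.flatMap (fun g => p.filter (fun y => key y == g)) := by
        cases hRe : fs'.flatMap (fun g => p.filter (fun y => key y == g)) with
        | nil => simp [PySem.List.insertBy]
        | cons y t =>
          have hy : y ∈ fs'.flatMap (fun g => p.filter (fun y => key y == g)) := by
            rw [hRe]; exact List.mem_cons_self
          obtain ⟨g, hg, hyg⟩ := List.mem_flatMap.mp hy
          have hkeyy : key y = g := by simpa using (List.mem_filter.mp hyg).2
          have hlt : key y < key x := by have := hhead g hg; omega
          simp [PySem.List.insertBy, hlt]
      rw [hR]
      have h1 : (p ++ [x]).filter (fun y => key y == f)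
          = p.filter (fun y => key y == f) ++ [x] := by
        simp [List.filter_append, hxf]
      have h2 : fs'.flatMap (fun g => (p ++ [x]).filter (fun y => key y == g))
          = fs'.flatMap (fun g => p.filter (fun y => key y == g)) := by
        refine List.flatMap_congr ?_
        intro g hg
        have hne : ¬ (key x = g) := by have := hhead g hg; omega
        simp [List.filter_append, hne]
      rw [h1, h2]
      simp
    · have hx' : key x ∈ fs' := by
        rcases List.mem_cons.mp hx with h | h
        · exact absurd h hxf
        · exact h
      have hxlt : key x < f := hhead (key x) hx'
      have hskip : ∀ y ∈ p.filter (fun y => key y == f),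
          (fun a b => decide (key b < key a)) x y = false := by
        intro y hy
        have hk : key y = f := by simpa using (List.mem_filter.mp hy).2
        simp [hk]; omega
      rw [pv_insertBy_skip _ _ _ _ hskip, ih htail p hx']
      have h1 : (p ++ [x]).filter (fun y => key y == f) = p.filter (fun y => key y == f) := by
        simp [List.filter_append, hxf]
      rw [h1]

theorem pv_foldl_ins {α : Type} (key : α → Int) (fs : List Int)
    (hfs : fs.Pairwise (· > ·)) : ∀ (xs : List α), (∀ x ∈ xs, key x ∈ fs) →
    xs.foldl (fun acc x => PySem.List.insertBy (fun a b => decide (key b < key a)) x acc) []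
      = fs.flatMap (fun f => xs.filter (fun y => key y == f)) := by
  intro xs
  induction xs using List.reverseRecOn with
  | nil => intro _; simp
  | append_singleton p x ih =>
    intro hmem
    rw [List.foldl_append, ih (fun y hy => hmem y (by simp [hy]))]
    simp only [List.foldl_cons, List.foldl_nil]
    exact pv_insert_bucket key fs hfs p x (hmem x (by simp))

-- stable descending sort = concatenation of equal-key buckets in decreasing key order
theorem pv_stable_desc {α : Type} (key : α → Int) (fs : List Int)
    (hfs : fs.Pairwise (· > ·)) (xs : List α) (hmem : ∀ x ∈ xs, key x ∈ fs) :
    PySem.List.sorted xs key true = fs.flatMap (fun f => xs.filter (fun y => key y == f)) := by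
  rw [PySem.List.sorted_rev_eq_foldl_insertBy]
  exact pv_foldl_ins key fs hfs xs hmem

theorem pv_pyRange_neg_one (a b : Int) :
    PySem.List.pyRange a b (-1) = (List.range (a - b).toNat).map (fun (k : Nat) => a - (k : Int)) := by
  have key : ∀ (n m : Nat), n = m →
      List.map (fun (k : Nat) => a + -1 * (k : Int)) (List.range n)
        = List.map (fun (k : Nat) => a - (k : Int)) (List.range m) := by
    rintro n _ rfl
    exact List.map_congr_left (fun k hk => by ring)
  simp only [PySem.List.pyRange]
  rw [if_neg (by norm_num), if_neg (by norm_num)]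
  by_cases h : b < a
  · rw [if_pos h]
    apply key
    norm_num
  · rw [if_neg h]
    apply key
    omega

theorem pv_mem_pyRange_neg_one (a b f : Int) :
    f ∈ PySem.List.pyRange a b (-1) ↔ b < f ∧ f ≤ a := by
  rw [pv_pyRange_neg_one]
  constructor
  · intro hf
    obtain ⟨k, hk, rfl⟩ := List.mem_map.mp hf
    have hk' := List.mem_range.mp hk
    omega
  · intro h
    exact List.mem_map.mpr ⟨(a - f).toNat, List.mem_range.mpr (by omega), by omega⟩

-- ===== VERDICT (by name: the statement is the Claim_ definition above) =====
theorem word_frequency_spec : Claim_equal_word_frequency := by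
  intro words θ m _
  unfold Spec_word_frequency
  simp only [word_frequency, word_frequency_alt]
  have hst : words.foldl (fun (st : PySem.Dict String Int × List String) w =>
      if st.1.contains w then (st.1.modify w 0 (· + 1), st.2)
      else (st.1.insert w 1, st.2 ++ [w])) (PySem.Dict.empty, [])
      = (PySem.Dict.counter words, PySem.Set.ofList words) := by
    have h := pv_build words []
    rw [List.nil_append] at h
    exact h
  rw [hst]
  dsimp only
  have hkeyfun : (fun w => (PySem.Dict.counter words).getD w 0)
      = (fun w => (List.count w words : Int)) :=
    funext fun w => PySem.Dict.getD_counter words w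
  have hvalid0 : ((PySem.Dict.counter words).items.filter (fun p => decide (θ ≤ p.2))).map (fun p => p.1)
      = (PySem.Set.ofList words : List String).filter (fun w => decide (θ ≤ (List.count w words : Int))) := by
    rw [PySem.Dict.items_counter, List.filter_map, List.map_map]
    simp only [Function.comp_def, List.map_id']
  have hvalues : (PySem.Dict.counter words).values
      = (PySem.Set.ofList words : List String).map (fun w => (List.count w words : Int)) := by
    simp only [PySem.Dict.values, PySem.Dict.items_counter, List.map_map, Function.comp_def]
  have hmaxfun : (fun (m f : Int) => if f > m then f else m) = (fun (m f : Int) => max m f) := by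
    funext m f; rw [max_def]; split_ifs <;> omega
  rw [hvalues, hmaxfun]
  set u : List String := (PySem.Set.ofList words : List String) with hu
  set maxf := (u.map (fun w => (List.count w words : Int))).foldl max 0 with hmaxf
  set lo : Int := if θ > 1 then θ else 1 with hlo
  have hθlo : θ ≤ lo ∧ 1 ≤ lo := by rw [hlo]; split_ifs <;> omega
  have hfsP : (PySem.List.pyRange maxf (lo - 1) (-1)).Pairwise (· > ·) := by
    rw [pv_pyRange_neg_one]
    refine List.pairwise_map.mpr (List.Pairwise.imp ?_ List.pairwise_lt_range)
    intro c d hcd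
    omega
  have hub : ∀ w ∈ u, (List.count w words : Int) ≤ maxf := by
    intro w hw
    exact (PySem.List.le_foldl_max _ 0).2 _ (List.mem_map.mpr ⟨w, hw, rfl⟩)
  have hinner : (fun (acc : List String) (f : Int) =>
        u.foldl (fun acc w => if (PySem.Dict.counter words).getD w 0 == f then acc ++ [w] else acc) acc)
      = (fun (acc : List String) (f : Int) =>
        acc ++ u.filter (fun w => (List.count w words : Int) == f)) := by
    funext acc f
    have h := PySem.List.foldl_append_if (fun w => ((List.count w words : Int) == f)) (fun w => w) u acc
    simp only [PySem.Dict.getD_counter]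
    simpa using h
  rw [hinner, PySem.List.foldl_append_eq_flatMap, List.nil_append]
  have hsorted : PySem.List.sorted (u.filter (fun w => decide (θ ≤ (List.count w words : Int))))
        (fun w => (List.count w words : Int)) true
      = (PySem.List.pyRange maxf (lo - 1) (-1)).flatMap (fun f =>
          (u.filter (fun w => decide (θ ≤ (List.count w words : Int)))).filter
            (fun w => (List.count w words : Int) == f)) := by
    refine pv_stable_desc _ _ hfsP _ ?_
    intro x hx
    obtain ⟨hxu, hxθ⟩ := List.mem_filter.mp hx
    have h1 : x ∈ words := (PySem.Set.mem_ofList words x).mp hxu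
    have hpos : 0 < List.count x words := List.count_pos_iff.mpr h1
    have hle := hub x hxu
    have hθx := of_decide_eq_true hxθ
    rw [pv_mem_pyRange_neg_one]
    omega
  have hbuckets : ∀ f ∈ PySem.List.pyRange maxf (lo - 1) (-1),
      (u.filter (fun w => decide (θ ≤ (List.count w words : Int)))).filter
        (fun w => (List.count w words : Int) == f)
      = u.filter (fun w => (List.count w words : Int) == f) := by
    intro f hf
    rw [List.filter_filter]
    refine List.filter_congr ?_
    intro w hw
    have hfr := (pv_mem_pyRange_neg_one _ _ f).mp hf
    by_cases hc : (List.count w words : Int) = f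
    · have hθf : θ ≤ f := by omega
      simp [hc, hθf]
    · simp [hc]
  rw [hkeyfun, hvalid0, hsorted, List.flatMap_congr hbuckets]
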